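-- pv_equiv track=rewrite | github.com/rathishpadman/MarathonTraining | app/training_heatmap_simple.py | _calculate_training_streaks
-- ===== SOURCE A (Python) =====
-- from typing import Dict, List, Optional
--
-- def _calculate_training_streaks(daily_data: Dict) -> tuple:
--     """Calculate current and longest training streaks"""
--     dates = sorted(daily_data.keys())
--     current_streak = 0
--     longest_streak = 0
--     temp_streak = 0
--
--     # Calculate current streak from most recent date backwards
--     for i in range(len(dates) - 1, -1, -1):
--         if daily_data[dates[i]]['intensity'] > 0:
--             current_streak += 1
--         else:
--             break
--
--     # Calculate longest streak
--     for date in dates: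
--         if daily_data[date]['intensity'] > 0:
--             temp_streak += 1
--             longest_streak = max(longest_streak, temp_streak)
--         else:
--             temp_streak = 0
--
--     return current_streak, longest_streak
-- ===== SOURCE B (Python) =====
-- def _calculate_training_streaks(daily_data):
--     """Calculate current and longest training streaks.
--
--     Single forward pass: a running streak resets on non-positive days;
--     the streak left at the end is exactly the current (trailing) streak.
--     """
--     temp_streak = 0
--     longest_streak = 0
--     for date in sorted(daily_data.keys()):
--         if daily_data[date]['intensity'] > 0:
--             temp_streak += 1
--             if temp_streak > longest_streak:
--                 longest_streak = temp_streak
--         else: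
--             temp_streak = 0
--     return temp_streak, longest_streak
-- ===== Notes on version B (the rewrite author's own statement) =====
-- stated objective: simpler
-- what changed: Replaces A's two loops (a backward scan for the current streak plus a forward scan for the longest) with one forward pass whose running streak at the end IS the current streak, proved equal to A's backward count.
-- outside the precondition, e.g. on _calculate_training_streaks({'a': {}}): A raises KeyError, B raises KeyError
import Mathlib
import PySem

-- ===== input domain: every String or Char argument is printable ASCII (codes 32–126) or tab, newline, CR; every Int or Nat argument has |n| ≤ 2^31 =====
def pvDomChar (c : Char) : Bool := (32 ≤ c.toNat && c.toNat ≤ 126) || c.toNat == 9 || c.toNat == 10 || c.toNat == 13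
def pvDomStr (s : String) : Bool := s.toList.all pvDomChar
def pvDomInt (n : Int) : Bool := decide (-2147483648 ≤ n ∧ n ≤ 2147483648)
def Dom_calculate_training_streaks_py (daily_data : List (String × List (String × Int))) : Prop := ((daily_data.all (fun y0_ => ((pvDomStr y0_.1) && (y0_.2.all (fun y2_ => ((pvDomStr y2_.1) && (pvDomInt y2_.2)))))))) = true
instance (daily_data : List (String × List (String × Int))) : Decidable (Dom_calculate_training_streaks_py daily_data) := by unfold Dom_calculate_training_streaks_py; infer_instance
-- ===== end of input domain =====

-- ===== PORT A =====
-- Header: B replaces A's two loops (backward current-streak scan + forward longest scan)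
-- by one forward pass; simpler, same cost. Return-value equivalence only (no mutation in either).

-- daily_data[date]['intensity'] as both Pythons perform it (first-match assoc lookup;
-- default 0 only fires outside Pre_, where the Python raises KeyError)
def pvIntensity (daily_data : List (String × List (String × Int))) (date : String) : Int :=
  (PySem.Dict.mk ((PySem.Dict.mk daily_data).getD date [])).getD "intensity" 0

-- A's first loop: walk dates from the most recent backwards, count until a non-positive day (break)
def pvABack (daily_data : List (String × List (String × Int))) : List String → Int
  | [] => 0
  | date :: rest =>
      if pvIntensity daily_data date > 0 then 1 + pvABack daily_data rest else 0

def calculate_training_streaks_py (daily_data : List (String × List (String × Int))) : Int × Int :=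
  let dates := PySem.List.sorted (daily_data.map Prod.fst) (fun x => x) false
  let current_streak := pvABack daily_data dates.reverse
  let r := dates.foldl (fun (s : Int × Int) date =>
      if pvIntensity daily_data date > 0 then (s.1 + 1, max s.2 (s.1 + 1)) else (0, s.2)) (0, 0)
  (current_streak, r.2)

-- ===== PORT B =====
def calculate_training_streaks_py_alt (daily_data : List (String × List (String × Int))) : Int × Int :=
  let dates := PySem.List.sorted (daily_data.map Prod.fst) (fun x => x) false
  dates.foldl (fun (s : Int × Int) date =>
      if pvIntensity daily_data date > 0 then
        (s.1 + 1, if s.1 + 1 > s.2 then s.1 + 1 else s.2)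
      else (0, s.2)) (0, 0)

-- ===== PRECONDITION & SPEC =====
-- Pre_ excludes assoc lists with duplicate outer date keys (they do not denote a Python dict:
-- construction collapses them) and inner dicts lacking the 'intensity' key (A raises KeyError there).
def Pre_calculate_training_streaks_py (daily_data : List (String × List (String × Int))) : Prop :=
  (daily_data.map Prod.fst).Nodup ∧ ∀ p ∈ daily_data, "intensity" ∈ p.2.map Prod.fst
instance (daily_data : List (String × List (String × Int))) : Decidable (Pre_calculate_training_streaks_py daily_data) := by
  unfold Pre_calculate_training_streaks_py; infer_instance

def pvWitness_calculate_training_streaks_py : (List (String × List (String × Int))) :=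
  [("2024-01-01", [("intensity", 1)]), ("2024-01-02", [("intensity", 0)])]

def Spec_calculate_training_streaks_py (daily_data : List (String × List (String × Int))) (out : Int × Int) : Prop := out = calculate_training_streaks_py_alt daily_data
instance (daily_data : List (String × List (String × Int))) (out : Int × Int) : Decidable (Spec_calculate_training_streaks_py daily_data out) := by unfold Spec_calculate_training_streaks_py; infer_instance

-- ===== CLAIM (what is proved, stated in full; the proofs are below) =====
def Claim_equal_calculate_training_streaks_py : Prop := ∀ (daily_data : List (String × List (String × Int))), Dom_calculate_training_streaks_py daily_data → Pre_calculate_training_streaks_py daily_data → Spec_calculate_training_streaks_py daily_data (calculate_training_streaks_py daily_data)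

-- ===== LEMMAS AND PROOFS =====

-- the two step functions agree (max l (t+1) = if t+1 > l then t+1 else l)
theorem pv_step_eq (d : List (String × List (String × Int))) :
    (fun (s : Int × Int) date =>
      if pvIntensity d date > 0 then (s.1 + 1, max s.2 (s.1 + 1)) else (0, s.2))
    = (fun (s : Int × Int) date =>
      if pvIntensity d date > 0 then
        (s.1 + 1, if s.1 + 1 > s.2 then s.1 + 1 else s.2)
      else (0, s.2)) := by
  funext s date
  by_cases h : pvIntensity d date > 0 <;> simp [h, max_def] <;> split_ifs <;> omega

-- the running streak left by B's pass is A's backward trailing count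
theorem pv_fold_fst (d : List (String × List (String × Int))) (xs : List String) :
    (xs.foldl (fun (s : Int × Int) date =>
      if pvIntensity d date > 0 then
        (s.1 + 1, if s.1 + 1 > s.2 then s.1 + 1 else s.2)
      else (0, s.2)) (0, 0)).1 = pvABack d xs.reverse := by
  induction xs using List.reverseRecOn with
  | nil => rfl
  | append_singleton ys x ih =>
    rw [List.foldl_append, List.reverse_append, List.reverse_singleton, List.singleton_append,
      pvABack, ← ih]
    by_cases h : pvIntensity d x > 0 <;> simp [h] <;> omega

-- ===== VERDICT (by name: the statement is the Claim_ definition above) =====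
theorem calculate_training_streaks_py_spec : Claim_equal_calculate_training_streaks_py := by
  intro d _ _
  unfold Spec_calculate_training_streaks_py calculate_training_streaks_py calculate_training_streaks_py_alt
  rw [pv_step_eq]
  exact Prod.ext (pv_fold_fst d _).symm rfl
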